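-- pv_equiv track=rewrite | github.com/ik-hse-projects/ReedMuller | ReedsAlgorithm.py | _subspace
-- ===== SOURCE A (Python) =====
-- def _subspace(basis):
--     for i in range(2**len(basis)):
--         result = 0
--         for mask in basis:
--             if (i & 1) == 1:
--                 result |= mask
--             i >>= 1
--         yield result
-- ===== SOURCE B (Python) =====
-- def _subspace(basis):
--     result = [0]
--     for mask in basis:
--         result += [r | mask for r in result]
--     yield from result
-- ===== Notes on version B (the rewrite author's own statement) =====
-- stated objective: faster
-- what changed: Replaces A's per-index inner scan of basis (recomputing each OR from scratch, O(2^n*n)) with a subset-doubling DP (result += [r | mask for r in result]), O(1) amortized per output; intended as faster - measured 16.4x at n=16, both necessarily time out at n=64 since the output itself has 2^n values.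
import Mathlib
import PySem

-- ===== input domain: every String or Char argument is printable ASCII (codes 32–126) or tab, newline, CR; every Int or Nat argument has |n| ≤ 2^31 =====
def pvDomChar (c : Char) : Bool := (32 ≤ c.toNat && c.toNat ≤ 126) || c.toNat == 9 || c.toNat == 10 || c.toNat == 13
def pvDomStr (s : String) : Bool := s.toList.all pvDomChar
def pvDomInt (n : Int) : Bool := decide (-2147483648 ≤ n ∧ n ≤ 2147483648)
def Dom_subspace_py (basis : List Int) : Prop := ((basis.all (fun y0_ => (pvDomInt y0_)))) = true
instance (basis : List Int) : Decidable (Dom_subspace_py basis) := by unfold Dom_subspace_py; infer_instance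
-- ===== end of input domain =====

-- B replaces A's per-index rescan of basis with a subset-doubling DP
-- (result += [r | mask for r in result]); intended as faster (measured 16.4x at n=16;
-- both are exponential in n, as the output has 2^n values).
-- A is a generator; equivalence is about the list of yielded values.

-- ===== PORT A =====
-- inner loop body of A: state (i, result); checks i & 1, ors mask, shifts i
def subspaceStep (p : Int × Int) (mask : Int) : Int × Int :=
  (p.1 >>> (1 : Nat), if PySem.Int.band p.1 1 = 1 then PySem.Int.bor p.2 mask else p.2)

def subspace_py (basis : List Int) : List Int :=
  (PySem.List.pyRange 0 (2 ^ basis.length) 1).map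
    (fun i => (basis.foldl subspaceStep (i, 0)).2)

-- ===== PORT B =====
def subspace_py_alt (basis : List Int) : List Int :=
  basis.foldl (fun result mask => result ++ result.map (fun r => PySem.Int.bor r mask)) [0]

-- ===== PRECONDITION & SPEC =====
def Spec_subspace_py (basis : List Int) (out : List Int) : Prop := out = subspace_py_alt basis
instance (basis : List Int) (out : List Int) : Decidable (Spec_subspace_py basis out) := by unfold Spec_subspace_py; infer_instance

-- ===== CLAIM (what is proved, stated in full; the proofs are below) =====
def Claim_equal_subspace_py : Prop := ∀ (basis : List Int), Dom_subspace_py basis → Spec_subspace_py basis (subspace_py basis)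

-- ===== LEMMAS AND PROOFS =====

-- Nat-indexed reading of A's inner loop (proof helper)
def gAux : List Int → Nat → Int → Int
  | [], _, r => r
  | c :: bs, j, r => gAux bs (j / 2) (if j % 2 = 1 then PySem.Int.bor r c else r)

theorem foldA_eq (bs : List Int) : ∀ (j : Nat) (r : Int),
    bs.foldl subspaceStep ((j : Int), r) = (((j / 2 ^ bs.length : Nat) : Int), gAux bs j r) := by
  induction bs with
  | nil => intro j r; simp [gAux]
  | cons c bs ih =>
    intro j r
    have hs : ((j : Int)) >>> (1 : Nat) = (((j / 2 : Nat) : Int)) := by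
      rw [show ((j : Int)) >>> (1 : Nat) = ((j >>> 1 : Nat) : Int) from by
        simp [Int.natCast_shiftRight]]
      norm_num [Nat.shiftRight_eq_div_pow]
    have hb : PySem.Int.band (j : Int) 1 = ((j % 2 : Nat) : Int) := by
      have h := PySem.Int.band_natCast j 1
      simpa [Nat.and_one_is_mod] using h
    have hc : (((j % 2 : Nat) : Int) = 1) ↔ (j % 2 = 1) := by exact_mod_cast Iff.rfl
    have hdd : (j / 2) / 2 ^ bs.length = j / 2 ^ (bs.length + 1) := by
      rw [Nat.div_div_eq_div_mul, pow_succ, mul_comm 2 (2 ^ bs.length), mul_comm]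
    simp only [List.foldl_cons, subspaceStep, hs, hb, hc, ih, gAux, List.length_cons, hdd]

theorem gAux_high (bs : List Int) : ∀ (j k : Nat) (r : Int),
    gAux bs (j + 2 ^ bs.length * k) r = gAux bs j r := by
  induction bs with
  | nil => intro j k r; simp [gAux]
  | cons c bs ih =>
    intro j k r
    have hp : (2 : Nat) ^ (bs.length + 1) = 2 ^ bs.length * 2 := pow_succ 2 bs.length
    simp only [gAux, List.length_cons, hp]
    generalize (2 : Nat) ^ bs.length = p at ih ⊢
    rw [show p * 2 * k = p * k * 2 from by ring]
    have e1 : ∀ q : Nat, (j + q * 2) % 2 = j % 2 := fun q => by omega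
    have e2 : ∀ q : Nat, (j + q * 2) / 2 = j / 2 + q := fun q => by omega
    simp only [e1, e2]
    exact ih (j / 2) k _

theorem gAux_append (bs : List Int) (m : Int) : ∀ (j : Nat) (r : Int),
    gAux (bs ++ [m]) j r =
      if (j / 2 ^ bs.length) % 2 = 1 then PySem.Int.bor (gAux bs j r) m else gAux bs j r := by
  induction bs with
  | nil => intro j r; simp [gAux]
  | cons c bs ih =>
    intro j r
    have hdd : (j / 2) / 2 ^ bs.length = j / 2 ^ (bs.length + 1) := by
      rw [Nat.div_div_eq_div_mul, pow_succ, mul_comm 2 (2 ^ bs.length), mul_comm]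
    simp only [List.cons_append, gAux, ih, List.length_cons, hdd]

theorem subA_eq_gAux (bs : List Int) :
    subspace_py bs = (List.range (2 ^ bs.length)).map (fun j => gAux bs j 0) := by
  have h2 : (2 : Int) ^ bs.length = ((2 ^ bs.length : Nat) : Int) := by push_cast; ring
  rw [subspace_py, h2, PySem.List.pyRange_zero_natCast, List.map_map]
  refine List.map_congr_left (fun j _ => ?_)
  simp [Function.comp, foldA_eq]

theorem altB_append (bs : List Int) (m : Int) :
    subspace_py_alt (bs ++ [m]) =
      subspace_py_alt bs ++ (subspace_py_alt bs).map (fun r => PySem.Int.bor r m) := by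
  simp [subspace_py_alt, List.foldl_append]

theorem key (bs : List Int) :
    (List.range (2 ^ bs.length)).map (fun j => gAux bs j 0) = subspace_py_alt bs := by
  induction bs using List.reverseRecOn with
  | nil => rfl
  | append_singleton bs m ih =>
    have hlen : (bs ++ [m]).length = bs.length + 1 := by simp
    have hsplit : (2 : Nat) ^ (bs.length + 1) = 2 ^ bs.length + 2 ^ bs.length := by
      rw [pow_succ]; omega
    rw [hlen, hsplit, List.range_add, List.map_append, List.map_map, altB_append bs m, ← ih]
    congr 1
    · refine List.map_congr_left (fun j hj => ?_)
      have hjlt : j < 2 ^ bs.length := List.mem_range.mp hj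
      rw [gAux_append, Nat.div_eq_of_lt hjlt]
      simp
    · rw [List.map_map]
      refine List.map_congr_left (fun j hj => ?_)
      have hjlt : j < 2 ^ bs.length := List.mem_range.mp hj
      have hd : (2 ^ bs.length + j) / 2 ^ bs.length = 1 := by
        have h0 : 0 < 2 ^ bs.length := Nat.two_pow_pos bs.length
        rw [Nat.add_comm, Nat.add_div_right _ h0, Nat.div_eq_of_lt hjlt]
      have hh : (2 ^ bs.length + j) = j + 2 ^ bs.length * 1 := by omega
      simp only [Function.comp, gAux_append, hd]
      rw [hh, gAux_high]
      simp

-- ===== VERDICT (by name: the statement is the Claim_ definition above) =====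
theorem subspace_py_spec : Claim_equal_subspace_py := by
  intro basis _
  unfold Spec_subspace_py
  rw [subA_eq_gAux, key]
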